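-- pv_equiv track=rewrite | github.com/sm-ababil/BRACU-CSE221-Algorithms | Assignment4/Task6/task6.py | max_diamonds
-- ===== SOURCE A (Python) =====
-- def dfs(graph, visited, r, c):
--     if r < 0 or r >= len(graph):
--         return 0
--     if c < 0 or c >= len(graph[0]):
--         return 0
--     if graph[r][c] == '#' or visited[r][c]:
--         return 0
--
--     visited[r][c] = True
--     diamonds = 0
--     if graph[r][c] == 'D':
--         diamonds += 1
--
--     diamonds += dfs(graph, visited, r + 1, c)
--     diamonds += dfs(graph, visited, r - 1, c)
--     diamonds += dfs(graph, visited, r, c + 1)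
--     diamonds += dfs(graph, visited, r, c - 1)
--
--     return diamonds
--
-- def max_diamonds(graph):
--     row = len(graph)
--     col = len(graph[0])
--     count = 0
--     for r in range(row):
--         for c in range(col):
--             if graph[r][c] == 'D':
--                 visited = []
--                 for i in range(row):
--                     visited.append([False] * col)
--                 count = max(count, dfs(graph, visited, r, c))
--
--     return count
-- ===== SOURCE B (Python) =====
-- def _flood(graph, visited, rows, cols, r, c):
--     if r < 0 or r >= rows or c < 0 or c >= cols:
--         return 0
--     if graph[r][c] == '#' or (r, c) in visited:
--         return 0
--     visited.add((r, c))
--     total = 1 if graph[r][c] == 'D' else 0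
--     total += _flood(graph, visited, rows, cols, r + 1, c)
--     total += _flood(graph, visited, rows, cols, r - 1, c)
--     total += _flood(graph, visited, rows, cols, r, c + 1)
--     total += _flood(graph, visited, rows, cols, r, c - 1)
--     return total
--
-- def max_diamonds(graph):
--     rows, cols = len(graph), len(graph[0])
--     visited = set()
--     best = 0
--     for r in range(rows):
--         for c in range(cols):
--             if graph[r][c] == 'D' and (r, c) not in visited:
--                 best = max(best, _flood(graph, visited, rows, cols, r, c))
--     return best
-- ===== Notes on version B (the rewrite author's own statement) =====
-- stated objective: alternative
-- what changed: A restarts a fresh-visited DFS from every diamond cell and takes the max; B does a single labelling pass with one shared visited set, flood-filling each diamond-containing component once and taking the max per-component diamond count.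
-- outside the precondition, e.g. on max_diamonds([]): A raises IndexError, B raises IndexError; on max_diamonds(['..', '.']): A raises IndexError, B raises IndexError
import Mathlib
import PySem

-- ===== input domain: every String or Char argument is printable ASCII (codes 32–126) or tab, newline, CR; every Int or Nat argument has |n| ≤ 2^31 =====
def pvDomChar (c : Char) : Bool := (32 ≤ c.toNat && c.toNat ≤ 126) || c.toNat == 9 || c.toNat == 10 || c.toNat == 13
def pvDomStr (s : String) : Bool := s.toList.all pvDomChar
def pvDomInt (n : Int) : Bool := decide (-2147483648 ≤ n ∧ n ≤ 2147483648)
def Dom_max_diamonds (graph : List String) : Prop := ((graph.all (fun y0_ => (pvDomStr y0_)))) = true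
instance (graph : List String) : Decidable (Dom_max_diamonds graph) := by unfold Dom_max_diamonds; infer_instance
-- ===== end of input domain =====

-- B replaces A's per-diamond restarted DFS by a single labelling pass with one shared
-- visited set, flooding each diamond-containing component once; the equality proved is
-- about return values (A and B mutate only their own local structures).

-- ===== PORT A =====

-- graph[i][j] as a total function; ports only read it at indices their Python reads.
def gridAt (g : List (List Char)) (i j : Nat) : Char := (g.getD i []).getD j ' '

-- A's recursive dfs; the mutated `visited` is threaded through and returned.
-- `fuel` is only a totality guard (rows*cols+1 is always enough: each recursive
-- descent first marks an unvisited cell).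
def dfsA (g : List (List Char)) : Nat → List (List Bool) → Int → Int → Int × List (List Bool)
  | 0, v, _, _ => (0, v)
  | fuel+1, v, r, c =>
    if r < 0 ∨ (g.length : Int) ≤ r then (0, v)
    else if c < 0 ∨ (((g.getD 0 []).length : Nat) : Int) ≤ c then (0, v)
    else if gridAt g r.toNat c.toNat = '#' ∨ (v.getD r.toNat []).getD c.toNat false then (0, v)
    else
      let v1 := v.modify r.toNat (fun row => row.set c.toNat true)
      let d0 : Int := if gridAt g r.toNat c.toNat = 'D' then 1 else 0
      let p1 := dfsA g fuel v1 (r+1) c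
      let p2 := dfsA g fuel p1.2 (r-1) c
      let p3 := dfsA g fuel p2.2 r (c+1)
      let p4 := dfsA g fuel p3.2 r (c-1)
      (d0 + p1.1 + p2.1 + p3.1 + p4.1, p4.2)

def max_diamonds (graph : List String) : Int :=
  let g := graph.map String.toList
  let row := g.length
  let col := (g.getD 0 []).length
  (List.range row).foldl (fun count r =>
    (List.range col).foldl (fun count c =>
      if gridAt g r c = 'D' then
        max count (dfsA g (row * col + 1)
          ((List.range row).foldl (fun v _ => v ++ [List.replicate col false]) [])
          (r : Int) (c : Int)).1
      else count) count) 0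

-- ===== PORT B =====

-- B's flood fill: one shared visited SET of coordinate pairs; returns the
-- component's diamond count.  Same fuel-as-totality-guard device.
def floodB (g : List (List Char)) (rows cols : Int) : Nat → List (Int × Int) → Int → Int → Int × List (Int × Int)
  | 0, s, _, _ => (0, s)
  | fuel+1, s, r, c =>
    if r < 0 ∨ rows ≤ r ∨ c < 0 ∨ cols ≤ c then (0, s)
    else if gridAt g r.toNat c.toNat = '#' ∨ PySem.Set.contains s (r, c) then (0, s)
    else
      let s1 := PySem.Set.add s (r, c)
      let d0 : Int := if gridAt g r.toNat c.toNat = 'D' then 1 else 0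
      let p1 := floodB g rows cols fuel s1 (r+1) c
      let p2 := floodB g rows cols fuel p1.2 (r-1) c
      let p3 := floodB g rows cols fuel p2.2 r (c+1)
      let p4 := floodB g rows cols fuel p3.2 r (c-1)
      (d0 + p1.1 + p2.1 + p3.1 + p4.1, p4.2)

def max_diamonds_alt (graph : List String) : Int :=
  let g := graph.map String.toList
  let rows := g.length
  let cols := (g.getD 0 []).length
  ((List.range rows).foldl (fun st r =>
    (List.range cols).foldl (fun st c =>
      if gridAt g r c = 'D' ∧ ¬ PySem.Set.contains st.2 ((r : Int), (c : Int)) then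
        let p := floodB g (rows : Int) (cols : Int) (rows * cols + 1) st.2 (r : Int) (c : Int)
        (max st.1 p.1, p.2)
      else st) st) ((0 : Int), ([] : List (Int × Int)))).1

-- ===== PRECONDITION & SPEC =====
-- Pre_ excludes exactly the inputs where the Python A raises IndexError:
-- the empty grid (graph[0]) and grids with a row shorter than the first row
-- (graph[r][c] for c < len(graph[0])).
def Pre_max_diamonds (graph : List String) : Prop :=
  graph ≠ [] ∧ ∀ s ∈ graph, (graph.headD "").toList.length ≤ s.toList.length
instance (graph : List String) : Decidable (Pre_max_diamonds graph) := by
  unfold Pre_max_diamonds; infer_instance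

def pvWitness_max_diamonds : List String := ["D.#", "#DD", ".#D"]

def Spec_max_diamonds (graph : List String) (out : Int) : Prop := out = max_diamonds_alt graph
instance (graph : List String) (out : Int) : Decidable (Spec_max_diamonds graph out) := by unfold Spec_max_diamonds; infer_instance

-- ===== CLAIM (what is proved, stated in full; the proofs are below) =====
def Claim_equal_max_diamonds : Prop := ∀ (graph : List String), Dom_max_diamonds graph → Pre_max_diamonds graph → Spec_max_diamonds graph (max_diamonds graph)

-- ===== LEMMAS AND PROOFS =====

-- abbreviations for the proof layer
def colsG (g : List (List Char)) : Nat := (g.getD 0 []).length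
def visV (v : List (List Bool)) (i j : Nat) : Bool := (v.getD i []).getD j false
def markV (v : List (List Bool)) (i j : Nat) : List (List Bool) :=
  v.modify i (fun row => row.set j true)
def dimsV (g : List (List Char)) (v : List (List Bool)) : Prop :=
  v.length = g.length ∧ ∀ row ∈ v, row.length = colsG g
def openP (g : List (List Char)) (p : Nat × Nat) : Prop :=
  p.1 < g.length ∧ p.2 < colsG g ∧ gridAt g p.1 p.2 ≠ '#'
def adjP (g : List (List Char)) (p q : Nat × Nat) : Prop :=
  openP g p ∧ openP g q ∧
    ((p.1 = q.1 ∧ (p.2 + 1 = q.2 ∨ q.2 + 1 = p.2)) ∨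
     (p.2 = q.2 ∧ (p.1 + 1 = q.1 ∨ q.1 + 1 = p.1)))
def reachP (g : List (List Char)) : Nat × Nat → Nat × Nat → Prop :=
  Relation.ReflTransGen (adjP g)
def cellsF (g : List (List Char)) : Finset (Nat × Nat) :=
  Finset.range g.length ×ˢ Finset.range (colsG g)
def falseC (g : List (List Char)) (v : List (List Bool)) : Nat :=
  ((cellsF g).filter (fun p => visV v p.1 p.2 = false)).card
def freshV (g : List (List Char)) : List (List Bool) :=
  List.replicate g.length (List.replicate (colsG g) false)
def FUELg (g : List (List Char)) : Nat := g.length * colsG g + 1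
def outA (g : List (List Char)) (p : Nat × Nat) : Int × List (List Bool) :=
  dfsA g (FUELg g) (freshV g) (p.1 : Int) (p.2 : Int)
def compS (g : List (List Char)) (p q : Nat × Nat) : Prop := visV (outA g p).2 q.1 q.2 = true
def nVal (g : List (List Char)) (p : Nat × Nat) : Int := (outA g p).1
def pairsL (g : List (List Char)) : List (Nat × Nat) :=
  (List.range g.length).flatMap (fun r => (List.range (colsG g)).map (fun c => (r, c)))

-- one-step unfolding of dfsA in the proof layer's vocabulary
lemma dfsA_succ (g : List (List Char)) (fuel : Nat) (v : List (List Bool)) (r c : Int) :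
    dfsA g (fuel+1) v r c =
    if r < 0 ∨ (g.length : Int) ≤ r then (0, v)
    else if c < 0 ∨ ((colsG g : Nat) : Int) ≤ c then (0, v)
    else if gridAt g r.toNat c.toNat = '#' ∨ visV v r.toNat c.toNat then (0, v)
    else
      ((if gridAt g r.toNat c.toNat = 'D' then (1:Int) else 0)
        + (dfsA g fuel (markV v r.toNat c.toNat) (r+1) c).1
        + (dfsA g fuel (dfsA g fuel (markV v r.toNat c.toNat) (r+1) c).2 (r-1) c).1
        + (dfsA g fuel (dfsA g fuel (dfsA g fuel (markV v r.toNat c.toNat) (r+1) c).2 (r-1) c).2 r (c+1)).1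
        + (dfsA g fuel (dfsA g fuel (dfsA g fuel (dfsA g fuel (markV v r.toNat c.toNat) (r+1) c).2 (r-1) c).2 r (c+1)).2 r (c-1)).1,
       (dfsA g fuel (dfsA g fuel (dfsA g fuel (dfsA g fuel (markV v r.toNat c.toNat) (r+1) c).2 (r-1) c).2 r (c+1)).2 r (c-1)).2) := rfl

lemma floodB_succ (g : List (List Char)) (rows cols : Int) (fuel : Nat) (s : List (Int × Int)) (r c : Int) :
    floodB g rows cols (fuel+1) s r c =
    if r < 0 ∨ rows ≤ r ∨ c < 0 ∨ cols ≤ c then (0, s)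
    else if gridAt g r.toNat c.toNat = '#' ∨ PySem.Set.contains s (r, c) then (0, s)
    else
      ((if gridAt g r.toNat c.toNat = 'D' then (1:Int) else 0)
        + (floodB g rows cols fuel (PySem.Set.add s (r, c)) (r+1) c).1
        + (floodB g rows cols fuel (floodB g rows cols fuel (PySem.Set.add s (r, c)) (r+1) c).2 (r-1) c).1
        + (floodB g rows cols fuel (floodB g rows cols fuel (floodB g rows cols fuel (PySem.Set.add s (r, c)) (r+1) c).2 (r-1) c).2 r (c+1)).1
        + (floodB g rows cols fuel (floodB g rows cols fuel (floodB g rows cols fuel (floodB g rows cols fuel (PySem.Set.add s (r, c)) (r+1) c).2 (r-1) c).2 r (c+1)).2 r (c-1)).1,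
       (floodB g rows cols fuel (floodB g rows cols fuel (floodB g rows cols fuel (floodB g rows cols fuel (PySem.Set.add s (r, c)) (r+1) c).2 (r-1) c).2 r (c+1)).2 r (c-1)).2) := rfl

lemma dfsA_zero (g : List (List Char)) (v : List (List Bool)) (r c : Int) :
    dfsA g 0 v r c = (0, v) := rfl

lemma floodB_zero (g : List (List Char)) (rows cols : Int) (s : List (Int × Int)) (r c : Int) :
    floodB g rows cols 0 s r c = (0, s) := rfl

lemma getD_replicate {α : Type} (n : Nat) (a d : α) (i : Nat) :
    (List.replicate n a).getD i d = if i < n then a else d := by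
  rw [List.getD_eq_getElem?_getD, List.getElem?_replicate]
  split_ifs <;> rfl

lemma visV_mark (g : List (List Char)) (v : List (List Bool)) (hd : dimsV g v)
    {i j : Nat} (hi : i < g.length) (hj : j < colsG g) (i' j' : Nat) :
    visV (markV v i j) i' j' = (visV v i' j' || (decide (i = i') && decide (j = j'))) := by
  rcases hd with ⟨hl, hr⟩
  unfold visV markV
  by_cases hii : i = i'
  · subst hii
    have hiv : i < v.length := by omega
    have hrow := hr v[i] (List.getElem_mem hiv)
    have h1 : (v.modify i fun row => row.set j true).getD i [] = v[i].set j true := by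
      rw [List.getD_eq_getElem?_getD, List.getElem?_modify, List.getElem?_eq_getElem hiv]
      simp
    have h2 : v.getD i [] = v[i] := by
      rw [List.getD_eq_getElem?_getD, List.getElem?_eq_getElem hiv]; rfl
    rw [h1, h2]
    by_cases hjj : j = j'
    · subst hjj
      have h3 : (v[i].set j true).getD j false = true := by
        rw [List.getD_eq_getElem?_getD, List.getElem?_set]
        simp [show j < v[i].length by omega]
      rw [h3]
      simp
    · have h3 : (v[i].set j true).getD j' false = v[i].getD j' false := by
        rw [List.getD_eq_getElem?_getD, List.getElem?_set, if_neg hjj,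
          ← List.getD_eq_getElem?_getD]
      rw [h3]
      simp [hjj]
  · have h1 : (v.modify i fun row => row.set j true).getD i' [] = v.getD i' [] := by
      rw [List.getD_eq_getElem?_getD, List.getElem?_modify, List.getD_eq_getElem?_getD]
      simp [hii]
    rw [h1]
    simp [hii]

lemma dims_mark (g : List (List Char)) (v : List (List Bool)) (hd : dimsV g v) (i j : Nat) :
    dimsV g (markV v i j) := by
  rcases hd with ⟨hl, hr⟩
  unfold markV
  constructor
  · rw [List.length_modify]
    exact hl
  · intro row hrow
    rw [List.mem_iff_getElem] at hrow
    obtain ⟨k, hk, rfl⟩ := hrow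
    simp only [List.length_modify] at hk
    rw [List.getElem_modify]
    split_ifs
    · rw [List.length_set]
      exact hr _ (List.getElem_mem hk)
    · exact hr _ (List.getElem_mem hk)

lemma visV_fresh (g : List (List Char)) (i j : Nat) : visV (freshV g) i j = false := by
  unfold visV freshV
  rw [getD_replicate]
  split_ifs with h
  · rw [getD_replicate]
    split_ifs <;> rfl
  · simp

lemma dims_fresh (g : List (List Char)) : dimsV g (freshV g) := by
  constructor
  · simp [freshV]
  · intro row hrow
    simp only [freshV] at hrow
    rw [List.eq_of_mem_replicate hrow]
    simp

lemma falseC_fresh (g : List (List Char)) : falseC g (freshV g) = g.length * colsG g := by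
  unfold falseC
  rw [Finset.filter_true_of_mem]
  · simp [cellsF]
  · intro p _
    exact visV_fresh g p.1 p.2

lemma falseC_mark (g : List (List Char)) (v : List (List Bool)) (hd : dimsV g v)
    {i j : Nat} (hi : i < g.length) (hj : j < colsG g) (hv : visV v i j = false) :
    falseC g (markV v i j) + 1 = falseC g v := by
  have hmem : (i, j) ∈ (cellsF g).filter (fun p => visV v p.1 p.2 = false) := by
    simp [cellsF, Finset.mem_filter, Finset.mem_product, hi, hj, hv]
  have hset : (cellsF g).filter (fun p => visV (markV v i j) p.1 p.2 = false)
      = ((cellsF g).filter (fun p => visV v p.1 p.2 = false)).erase (i, j) := by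
    ext p
    rcases p with ⟨a, b⟩
    simp only [Finset.mem_filter, Finset.mem_erase, cellsF, Finset.mem_product,
      Finset.mem_range, visV_mark g v hd hi hj a b, Bool.or_eq_false_iff,
      Bool.and_eq_false_iff, decide_eq_false_iff_not, Prod.mk.injEq, ne_eq, not_and]
    tauto
  unfold falseC
  rw [hset, Finset.card_erase_of_mem hmem]
  have hpos : 0 < ((cellsF g).filter (fun p => visV v p.1 p.2 = false)).card :=
    Finset.card_pos.mpr ⟨_, hmem⟩
  omega

lemma falseC_mono (g : List (List Char)) (v v' : List (List Bool))
    (h : ∀ i j, visV v i j = true → visV v' i j = true) : falseC g v' ≤ falseC g v := by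
  unfold falseC
  apply Finset.card_le_card
  intro p hp
  rw [Finset.mem_filter] at hp ⊢
  refine ⟨hp.1, ?_⟩
  cases hvp : visV v p.1 p.2
  · rfl
  · exact absurd hp.2 (by simp [h p.1 p.2 hvp])

lemma dfsA_mono (g : List (List Char)) : ∀ (fuel : Nat) (v : List (List Bool)) (r c : Int),
    dimsV g v → dimsV g (dfsA g fuel v r c).2 ∧
      ∀ i j, visV v i j = true → visV (dfsA g fuel v r c).2 i j = true := by
  intro fuel
  induction fuel with
  | zero => exact fun v r c hd => ⟨hd, fun i j h => h⟩
  | succ fuel ih =>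
    intro v r c hd
    rw [dfsA_succ]
    by_cases h1 : (r < 0 ∨ ((g.length : Nat) : Int) ≤ r)
    · rw [if_pos h1]
      exact ⟨hd, fun i j h => h⟩
    rw [if_neg h1]
    by_cases h2 : (c < 0 ∨ ((colsG g : Nat) : Int) ≤ c)
    · rw [if_pos h2]
      exact ⟨hd, fun i j h => h⟩
    rw [if_neg h2]
    by_cases h3 : (gridAt g r.toNat c.toNat = '#' ∨ visV v r.toNat c.toNat = true)
    · rw [if_pos h3]
      exact ⟨hd, fun i j h => h⟩
    rw [if_neg h3]
    have hb1 : r.toNat < g.length := by omega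
    have hb2 : c.toNat < colsG g := by omega
    have hd1 := dims_mark g v hd r.toNat c.toNat
    obtain ⟨hdA, hmA⟩ := ih (markV v r.toNat c.toNat) (r+1) c hd1
    obtain ⟨hdB, hmB⟩ := ih _ (r-1) c hdA
    obtain ⟨hdC, hmC⟩ := ih _ r (c+1) hdB
    obtain ⟨hdD, hmD⟩ := ih _ r (c-1) hdC
    refine ⟨hdD, fun i j h => ?_⟩
    apply hmD
    apply hmC
    apply hmB
    apply hmA
    rw [visV_mark g v hd hb1 hb2]
    simp [h]

lemma dfsA_open_new (g : List (List Char)) : ∀ (fuel : Nat) (v : List (List Bool)) (r c : Int),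
    dimsV g v → ∀ i j, visV (dfsA g fuel v r c).2 i j = true → visV v i j = false →
      openP g (i, j) := by
  intro fuel
  induction fuel with
  | zero =>
    intro v r c hd i j h1 h2
    rw [dfsA_zero] at h1
    rw [h1] at h2
    cases h2
  | succ fuel ih =>
    intro v r c hd i j hnew hold
    rw [dfsA_succ] at hnew
    by_cases h1 : (r < 0 ∨ ((g.length : Nat) : Int) ≤ r)
    · rw [if_pos ‹_›] at hnew; rw [hnew] at hold; cases hold
    rw [if_neg h1] at hnew
    by_cases h2 : (c < 0 ∨ ((colsG g : Nat) : Int) ≤ c)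
    · rw [if_pos ‹_›] at hnew; rw [hnew] at hold; cases hold
    rw [if_neg h2] at hnew
    by_cases h3 : (gridAt g r.toNat c.toNat = '#' ∨ visV v r.toNat c.toNat = true)
    · rw [if_pos ‹_›] at hnew; rw [hnew] at hold; cases hold
    rw [if_neg h3] at hnew
    have hb1 : r.toNat < g.length := by omega
    have hb2 : c.toNat < colsG g := by omega
    have hd1 := dims_mark g v hd r.toNat c.toNat
    obtain ⟨hdA, hmA⟩ := dfsA_mono g fuel (markV v r.toNat c.toNat) (r+1) c hd1
    obtain ⟨hdB, hmB⟩ := dfsA_mono g fuel _ (r-1) c hdA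
    obtain ⟨hdC, hmC⟩ := dfsA_mono g fuel _ r (c+1) hdB
    simp only at hnew
    by_cases s3 : visV (dfsA g fuel (dfsA g fuel (dfsA g fuel (markV v r.toNat c.toNat) (r+1) c).2 (r-1) c).2 r (c+1)).2 i j = true
    case neg => exact ih _ r (c-1) hdC i j hnew (by simpa using s3)
    by_cases s2 : visV (dfsA g fuel (dfsA g fuel (markV v r.toNat c.toNat) (r+1) c).2 (r-1) c).2 i j = true
    case neg => exact ih _ r (c+1) hdB i j s3 (by simpa using s2)
    by_cases s1 : visV (dfsA g fuel (markV v r.toNat c.toNat) (r+1) c).2 i j = true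
    case neg => exact ih _ (r-1) c hdA i j s2 (by simpa using s1)
    by_cases s0 : visV (markV v r.toNat c.toNat) i j = true
    case neg => exact ih _ (r+1) c hd1 i j s1 (by simpa using s0)
    rw [visV_mark g v hd hb1 hb2, hold] at s0
    simp only [Bool.false_or, Bool.and_eq_true, decide_eq_true_eq] at s0
    rcases s0 with ⟨hri, hcj⟩
    subst hri hcj
    rcases not_or.1 h3 with ⟨hw, _⟩
    exact ⟨hb1, hb2, hw⟩

lemma dfsA_reach_new (g : List (List Char)) : ∀ (fuel : Nat) (v : List (List Bool)) (r c : Int),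
    dimsV g v → ∀ i j, visV (dfsA g fuel v r c).2 i j = true → visV v i j = false →
      0 ≤ r ∧ 0 ≤ c ∧ openP g (r.toNat, c.toNat) ∧ reachP g (r.toNat, c.toNat) (i, j) := by
  intro fuel
  induction fuel with
  | zero =>
    intro v r c hd i j h1 h2
    rw [dfsA_zero] at h1
    rw [h1] at h2
    cases h2
  | succ fuel ih =>
    intro v r c hd i j hnew hold
    rw [dfsA_succ] at hnew
    by_cases h1 : (r < 0 ∨ ((g.length : Nat) : Int) ≤ r)
    · rw [if_pos ‹_›] at hnew; rw [hnew] at hold; cases hold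
    rw [if_neg h1] at hnew
    by_cases h2 : (c < 0 ∨ ((colsG g : Nat) : Int) ≤ c)
    · rw [if_pos ‹_›] at hnew; rw [hnew] at hold; cases hold
    rw [if_neg h2] at hnew
    by_cases h3 : (gridAt g r.toNat c.toNat = '#' ∨ visV v r.toNat c.toNat = true)
    · rw [if_pos ‹_›] at hnew; rw [hnew] at hold; cases hold
    rw [if_neg h3] at hnew
    have hb1 : r.toNat < g.length := by omega
    have hb2 : c.toNat < colsG g := by omega
    have hr0 : (0:Int) ≤ r := by omega
    have hc0 : (0:Int) ≤ c := by omega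
    rcases not_or.1 h3 with ⟨hw, hv⟩
    have hox : openP g (r.toNat, c.toNat) := ⟨hb1, hb2, hw⟩
    have hd1 := dims_mark g v hd r.toNat c.toNat
    obtain ⟨hdA, hmA⟩ := dfsA_mono g fuel (markV v r.toNat c.toNat) (r+1) c hd1
    obtain ⟨hdB, hmB⟩ := dfsA_mono g fuel _ (r-1) c hdA
    obtain ⟨hdC, hmC⟩ := dfsA_mono g fuel _ r (c+1) hdB
    refine ⟨hr0, hc0, hox, ?_⟩
    simp only at hnew
    by_cases s3 : visV (dfsA g fuel (dfsA g fuel (dfsA g fuel (markV v r.toNat c.toNat) (r+1) c).2 (r-1) c).2 r (c+1)).2 i j = true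
    case neg =>
      obtain ⟨ha, hb, hoq, hre⟩ := ih _ r (c-1) hdC i j hnew (by simpa using s3)
      have he2 : (((r:Int).toNat : Nat), (c-1).toNat) = (r.toNat, c.toNat - 1) := by
        simp only [Prod.mk.injEq, true_and, and_true]
        omega
      refine Relation.ReflTransGen.head ?_ (he2 ▸ hre)
      refine ⟨hox, he2 ▸ hoq, ?_⟩
      left
      exact ⟨rfl, Or.inr (by omega)⟩
    by_cases s2 : visV (dfsA g fuel (dfsA g fuel (markV v r.toNat c.toNat) (r+1) c).2 (r-1) c).2 i j = true
    case neg =>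
      obtain ⟨ha, hb, hoq, hre⟩ := ih _ r (c+1) hdB i j s3 (by simpa using s2)
      have he2 : (((r:Int).toNat : Nat), (c+1).toNat) = (r.toNat, c.toNat + 1) := by
        simp only [Prod.mk.injEq, true_and, and_true]
        omega
      refine Relation.ReflTransGen.head ?_ (he2 ▸ hre)
      refine ⟨hox, he2 ▸ hoq, ?_⟩
      left
      exact ⟨rfl, Or.inl rfl⟩
    by_cases s1 : visV (dfsA g fuel (markV v r.toNat c.toNat) (r+1) c).2 i j = true
    case neg =>
      obtain ⟨ha, hb, hoq, hre⟩ := ih _ (r-1) c hdA i j s2 (by simpa using s1)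
      have he2 : (((r-1).toNat : Nat), (c:Int).toNat) = (r.toNat - 1, c.toNat) := by
        simp only [Prod.mk.injEq, true_and, and_true]
        omega
      refine Relation.ReflTransGen.head ?_ (he2 ▸ hre)
      refine ⟨hox, he2 ▸ hoq, ?_⟩
      right
      exact ⟨rfl, Or.inr (by omega)⟩
    by_cases s0 : visV (markV v r.toNat c.toNat) i j = true
    case neg =>
      obtain ⟨ha, hb, hoq, hre⟩ := ih _ (r+1) c hd1 i j s1 (by simpa using s0)
      have he2 : (((r+1).toNat : Nat), (c:Int).toNat) = (r.toNat + 1, c.toNat) := by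
        simp only [Prod.mk.injEq, true_and, and_true]
        omega
      refine Relation.ReflTransGen.head ?_ (he2 ▸ hre)
      refine ⟨hox, he2 ▸ hoq, ?_⟩
      right
      exact ⟨rfl, Or.inl rfl⟩
    rw [visV_mark g v hd hb1 hb2, hold] at s0
    simp only [Bool.false_or, Bool.and_eq_true, decide_eq_true_eq] at s0
    rcases s0 with ⟨hri, hcj⟩
    subst hri hcj
    exact Relation.ReflTransGen.refl

lemma dfsA_marks (g : List (List Char)) (fuel : Nat) (v : List (List Bool)) (r c : Int)
    (hd : dimsV g v) (hf : 1 ≤ fuel) (hr : 0 ≤ r) (hc : 0 ≤ c)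
    (ho : openP g (r.toNat, c.toNat)) : visV (dfsA g fuel v r c).2 r.toNat c.toNat = true := by
  match fuel, hf with
  | fuel+1, _ =>
    rw [dfsA_succ]
    rcases ho with ⟨ho1, ho2, ho3⟩
    by_cases h1 : (r < 0 ∨ ((g.length : Nat) : Int) ≤ r)
    · rw [if_pos h1]
      first
      | omega
      | (rcases h3 with h | h
         · exact absurd h ho3
         · exact h)
    rw [if_neg h1]
    by_cases h2 : (c < 0 ∨ ((colsG g : Nat) : Int) ≤ c)
    · rw [if_pos h2]
      first
      | omega
      | (rcases h3 with h | h
         · exact absurd h ho3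
         · exact h)
    rw [if_neg h2]
    by_cases h3 : (gridAt g r.toNat c.toNat = '#' ∨ visV v r.toNat c.toNat = true)
    · rw [if_pos h3]
      first
      | omega
      | (rcases h3 with h | h
         · exact absurd h ho3
         · exact h)
    rw [if_neg h3]
    have hb1 : r.toNat < g.length := by omega
    have hb2 : c.toNat < colsG g := by omega
    have hd1 := dims_mark g v hd r.toNat c.toNat
    obtain ⟨hdA, hmA⟩ := dfsA_mono g fuel (markV v r.toNat c.toNat) (r+1) c hd1
    obtain ⟨hdB, hmB⟩ := dfsA_mono g fuel _ (r-1) c hdA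
    obtain ⟨hdC, hmC⟩ := dfsA_mono g fuel _ r (c+1) hdB
    obtain ⟨hdD, hmD⟩ := dfsA_mono g fuel _ r (c-1) hdC
    apply hmD
    apply hmC
    apply hmB
    apply hmA
    rw [visV_mark g v hd hb1 hb2]
    simp

lemma card_step {P : Type} [DecidableEq P] (s : Finset P) (a b c : P → Bool)
    (D : P → Prop) [DecidablePred D]
    (hab : ∀ p ∈ s, a p = true → b p = true) (hbc : ∀ p ∈ s, b p = true → c p = true) :
    (s.filter (fun p => c p = true ∧ a p = false ∧ D p)).card =
      (s.filter (fun p => b p = true ∧ a p = false ∧ D p)).card +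
      (s.filter (fun p => c p = true ∧ b p = false ∧ D p)).card := by
  have hu : s.filter (fun p => c p = true ∧ a p = false ∧ D p)
      = s.filter (fun p => b p = true ∧ a p = false ∧ D p) ∪
        s.filter (fun p => c p = true ∧ b p = false ∧ D p) := by
    ext p
    simp only [Finset.mem_union, Finset.mem_filter]
    constructor
    · rintro ⟨hs, hc, ha, hD⟩
      cases hbp : b p
      · exact Or.inr ⟨hs, hc, rfl, hD⟩
      · exact Or.inl ⟨hs, rfl, ha, hD⟩
    · rintro (⟨hs, hb, ha, hD⟩ | ⟨hs, hc2, hb, hD⟩)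
      · exact ⟨hs, hbc p hs hb, ha, hD⟩
      · refine ⟨hs, hc2, ?_, hD⟩
        cases hap : a p
        · rfl
        · rw [hab p hs hap] at hb
          cases hb
  rw [hu, Finset.card_union_of_disjoint]
  rw [Finset.disjoint_left]
  rintro p hp1 hp2
  rw [Finset.mem_filter] at hp1 hp2
  rw [hp1.2.1] at hp2
  exact absurd hp2.2.2.1 (by simp)

lemma dfsA_count (g : List (List Char)) : ∀ (fuel : Nat) (v : List (List Bool)) (r c : Int),
    dimsV g v → (dfsA g fuel v r c).1 =
      (((cellsF g).filter (fun p => visV (dfsA g fuel v r c).2 p.1 p.2 = true ∧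
        visV v p.1 p.2 = false ∧ gridAt g p.1 p.2 = 'D')).card : Int) := by
  intro fuel
  induction fuel with
  | zero =>
    intro v r c hd
    rw [dfsA_zero]
    rw [Finset.filter_false_of_mem]
    · simp
    · rintro p _ ⟨hx1, hx2, _⟩
      rw [hx1] at hx2
      cases hx2
  | succ fuel ih =>
    intro v r c hd
    rw [dfsA_succ]
    by_cases h1 : (r < 0 ∨ ((g.length : Nat) : Int) ≤ r)
    · rw [if_pos h1, Finset.filter_false_of_mem]
      · simp
      · rintro p _ ⟨hx1, hx2, _⟩
        rw [hx1] at hx2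
        cases hx2
    rw [if_neg h1]
    by_cases h2 : (c < 0 ∨ ((colsG g : Nat) : Int) ≤ c)
    · rw [if_pos h2, Finset.filter_false_of_mem]
      · simp
      · rintro p _ ⟨hx1, hx2, _⟩
        rw [hx1] at hx2
        cases hx2
    rw [if_neg h2]
    by_cases h3 : (gridAt g r.toNat c.toNat = '#' ∨ visV v r.toNat c.toNat = true)
    · rw [if_pos h3, Finset.filter_false_of_mem]
      · simp
      · rintro p _ ⟨hx1, hx2, _⟩
        rw [hx1] at hx2
        cases hx2
    rw [if_neg h3]
    have hb1 : r.toNat < g.length := by omega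
    have hb2 : c.toNat < colsG g := by omega
    rcases not_or.1 h3 with ⟨hw, hv⟩
    have hvx : visV v r.toNat c.toNat = false := by simpa using hv
    have hd1 := dims_mark g v hd r.toNat c.toNat
    obtain ⟨hdA, hmA⟩ := dfsA_mono g fuel (markV v r.toNat c.toNat) (r+1) c hd1
    obtain ⟨hdB, hmB⟩ := dfsA_mono g fuel _ (r-1) c hdA
    obtain ⟨hdC, hmC⟩ := dfsA_mono g fuel _ r (c+1) hdB
    obtain ⟨hdD, hmD⟩ := dfsA_mono g fuel _ r (c-1) hdC
    have e1 := ih (markV v r.toNat c.toNat) (r+1) c hd1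
    have e2 := ih (dfsA g fuel (markV v r.toNat c.toNat) (r+1) c).2 (r-1) c hdA
    have e3 := ih (dfsA g fuel (dfsA g fuel (markV v r.toNat c.toNat) (r+1) c).2 (r-1) c).2 r (c+1) hdB
    have e4 := ih (dfsA g fuel (dfsA g fuel (dfsA g fuel (markV v r.toNat c.toNat) (r+1) c).2 (r-1) c).2 r (c+1)).2 r (c-1) hdC
    have hm0 : ∀ p ∈ cellsF g, visV v p.1 p.2 = true → visV (markV v r.toNat c.toNat) p.1 p.2 = true := by
      intro p _ h
      rw [visV_mark g v hd hb1 hb2]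
      simp [h]
    have hm1 : ∀ p ∈ cellsF g, visV (markV v r.toNat c.toNat) p.1 p.2 = true →
        visV (dfsA g fuel (markV v r.toNat c.toNat) (r+1) c).2 p.1 p.2 = true :=
      fun p _ h => hmA _ _ h
    have hm2 : ∀ p ∈ cellsF g, visV (dfsA g fuel (markV v r.toNat c.toNat) (r+1) c).2 p.1 p.2 = true →
        visV (dfsA g fuel (dfsA g fuel (markV v r.toNat c.toNat) (r+1) c).2 (r-1) c).2 p.1 p.2 = true :=
      fun p _ h => hmB _ _ h
    have hm3 : ∀ p ∈ cellsF g, visV (dfsA g fuel (dfsA g fuel (markV v r.toNat c.toNat) (r+1) c).2 (r-1) c).2 p.1 p.2 = true →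
        visV (dfsA g fuel (dfsA g fuel (dfsA g fuel (markV v r.toNat c.toNat) (r+1) c).2 (r-1) c).2 r (c+1)).2 p.1 p.2 = true :=
      fun p _ h => hmC _ _ h
    have hm4 : ∀ p ∈ cellsF g, visV (dfsA g fuel (dfsA g fuel (dfsA g fuel (markV v r.toNat c.toNat) (r+1) c).2 (r-1) c).2 r (c+1)).2 p.1 p.2 = true →
        visV (dfsA g fuel (dfsA g fuel (dfsA g fuel (dfsA g fuel (markV v r.toNat c.toNat) (r+1) c).2 (r-1) c).2 r (c+1)).2 r (c-1)).2 p.1 p.2 = true :=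
      fun p _ h => hmD _ _ h
    have t1 := card_step (cellsF g) (fun p => visV v p.1 p.2)
      (fun p => visV (markV v r.toNat c.toNat) p.1 p.2)
      (fun p => visV (dfsA g fuel (dfsA g fuel (dfsA g fuel (dfsA g fuel (markV v r.toNat c.toNat) (r+1) c).2 (r-1) c).2 r (c+1)).2 r (c-1)).2 p.1 p.2)
      (fun p => gridAt g p.1 p.2 = 'D') hm0
      (fun p hp h => hm4 p hp (hm3 p hp (hm2 p hp (hm1 p hp h))))
    have t2 := card_step (cellsF g)
      (fun p => visV (markV v r.toNat c.toNat) p.1 p.2)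
      (fun p => visV (dfsA g fuel (markV v r.toNat c.toNat) (r+1) c).2 p.1 p.2)
      (fun p => visV (dfsA g fuel (dfsA g fuel (dfsA g fuel (dfsA g fuel (markV v r.toNat c.toNat) (r+1) c).2 (r-1) c).2 r (c+1)).2 r (c-1)).2 p.1 p.2)
      (fun p => gridAt g p.1 p.2 = 'D') hm1
      (fun p hp h => hm4 p hp (hm3 p hp (hm2 p hp h)))
    have t3 := card_step (cellsF g)
      (fun p => visV (dfsA g fuel (markV v r.toNat c.toNat) (r+1) c).2 p.1 p.2)
      (fun p => visV (dfsA g fuel (dfsA g fuel (markV v r.toNat c.toNat) (r+1) c).2 (r-1) c).2 p.1 p.2)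
      (fun p => visV (dfsA g fuel (dfsA g fuel (dfsA g fuel (dfsA g fuel (markV v r.toNat c.toNat) (r+1) c).2 (r-1) c).2 r (c+1)).2 r (c-1)).2 p.1 p.2)
      (fun p => gridAt g p.1 p.2 = 'D') hm2
      (fun p hp h => hm4 p hp (hm3 p hp h))
    have t4 := card_step (cellsF g)
      (fun p => visV (dfsA g fuel (dfsA g fuel (markV v r.toNat c.toNat) (r+1) c).2 (r-1) c).2 p.1 p.2)
      (fun p => visV (dfsA g fuel (dfsA g fuel (dfsA g fuel (markV v r.toNat c.toNat) (r+1) c).2 (r-1) c).2 r (c+1)).2 p.1 p.2)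
      (fun p => visV (dfsA g fuel (dfsA g fuel (dfsA g fuel (dfsA g fuel (markV v r.toNat c.toNat) (r+1) c).2 (r-1) c).2 r (c+1)).2 r (c-1)).2 p.1 p.2)
      (fun p => gridAt g p.1 p.2 = 'D') hm3
      (fun p hp h => hm4 p hp h)
    have hbase : (cellsF g).filter (fun p => visV (markV v r.toNat c.toNat) p.1 p.2 = true ∧
        visV v p.1 p.2 = false ∧ gridAt g p.1 p.2 = 'D')
        = if gridAt g r.toNat c.toNat = 'D' then {(r.toNat, c.toNat)} else (∅ : Finset (Nat × Nat)) := by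
      ext p
      rcases p with ⟨a, b⟩
      simp only [Finset.mem_filter, cellsF, Finset.mem_product, Finset.mem_range,
        visV_mark g v hd hb1 hb2]
      split_ifs with hD
      · simp only [Finset.mem_singleton, Prod.mk.injEq]
        constructor
        · rintro ⟨hbounds, hAm, hA0, hDp⟩
          rw [hA0, Bool.false_or, Bool.and_eq_true, decide_eq_true_eq, decide_eq_true_eq] at hAm
          exact ⟨hAm.1.symm, hAm.2.symm⟩
        · rintro ⟨ha1, hb1'⟩
          subst ha1
          subst hb1'
          refine ⟨⟨hb1, hb2⟩, by simp, hvx, hD⟩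
      · simp only [Finset.notMem_empty, iff_false, not_and]
        rintro hbounds hAm hA0
        rw [hA0, Bool.false_or, Bool.and_eq_true, decide_eq_true_eq, decide_eq_true_eq] at hAm
        rcases hAm with ⟨ha1, hb1'⟩
        subst ha1
        subst hb1'
        exact hD
    rw [hbase] at t1
    rw [apply_ite Finset.card, Finset.card_singleton, Finset.card_empty] at t1
    simp only
    rw [t1, t2, t3, t4]
    beta_reduce
    push_cast
    rw [← e1, ← e2, ← e3, ← e4]
    split_ifs with hD <;> ring
  

lemma dfsA_closed (g : List (List Char)) : ∀ (fuel : Nat) (v : List (List Bool)) (r c : Int),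
    dimsV g v → falseC g v < fuel →
    ∀ i j, visV (dfsA g fuel v r c).2 i j = true → visV v i j = false →
    ∀ q, adjP g (i, j) q → visV (dfsA g fuel v r c).2 q.1 q.2 = true := by
  intro fuel
  induction fuel with
  | zero =>
    intro v r c hd hlt
    omega
  | succ fuel ih =>
    intro v r c hd hlt i j hnew hold q hadj
    rw [dfsA_succ] at hnew ⊢
    by_cases h1 : (r < 0 ∨ ((g.length : Nat) : Int) ≤ r)
    · rw [if_pos h1] at hnew ⊢
      rw [hnew] at hold
      cases hold
    rw [if_neg h1] at hnew ⊢
    by_cases h2 : (c < 0 ∨ ((colsG g : Nat) : Int) ≤ c)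
    · rw [if_pos h2] at hnew ⊢
      rw [hnew] at hold
      cases hold
    rw [if_neg h2] at hnew ⊢
    by_cases h3 : (gridAt g r.toNat c.toNat = '#' ∨ visV v r.toNat c.toNat = true)
    · rw [if_pos h3] at hnew ⊢
      rw [hnew] at hold
      cases hold
    rw [if_neg h3] at hnew ⊢
    have hb1 : r.toNat < g.length := by omega
    have hb2 : c.toNat < colsG g := by omega
    rcases not_or.1 h3 with ⟨hw, hv⟩
    have hvx : visV v r.toNat c.toNat = false := by simpa using hv
    have hox : openP g (r.toNat, c.toNat) := ⟨hb1, hb2, hw⟩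
    have hd1 := dims_mark g v hd r.toNat c.toNat
    obtain ⟨hdA, hmA⟩ := dfsA_mono g fuel (markV v r.toNat c.toNat) (r+1) c hd1
    obtain ⟨hdB, hmB⟩ := dfsA_mono g fuel _ (r-1) c hdA
    obtain ⟨hdC, hmC⟩ := dfsA_mono g fuel _ r (c+1) hdB
    obtain ⟨hdD, hmD⟩ := dfsA_mono g fuel _ r (c-1) hdC
    have hfm := falseC_mark g v hd hb1 hb2 hvx
    have hf1 : falseC g (dfsA g fuel (markV v r.toNat c.toNat) (r+1) c).2 ≤ falseC g (markV v r.toNat c.toNat) :=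
      falseC_mono g _ _ hmA
    have hf2 : falseC g (dfsA g fuel (dfsA g fuel (markV v r.toNat c.toNat) (r+1) c).2 (r-1) c).2 ≤ falseC g (dfsA g fuel (markV v r.toNat c.toNat) (r+1) c).2 :=
      falseC_mono g _ _ hmB
    have hf3 : falseC g (dfsA g fuel (dfsA g fuel (dfsA g fuel (markV v r.toNat c.toNat) (r+1) c).2 (r-1) c).2 r (c+1)).2 ≤ falseC g (dfsA g fuel (dfsA g fuel (markV v r.toNat c.toNat) (r+1) c).2 (r-1) c).2 :=
      falseC_mono g _ _ hmC
    have hfuel1 : 1 ≤ fuel := by omega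
    simp only at hnew ⊢
    by_cases s3 : visV (dfsA g fuel (dfsA g fuel (dfsA g fuel (markV v r.toNat c.toNat) (r+1) c).2 (r-1) c).2 r (c+1)).2 i j = true
    case neg =>
      exact ih _ r (c-1) hdC (by omega) i j hnew (by simpa using s3) q hadj
    by_cases s2 : visV (dfsA g fuel (dfsA g fuel (markV v r.toNat c.toNat) (r+1) c).2 (r-1) c).2 i j = true
    case neg =>
      exact hmD _ _ (ih _ r (c+1) hdB (by omega) i j s3 (by simpa using s2) q hadj)
    by_cases s1 : visV (dfsA g fuel (markV v r.toNat c.toNat) (r+1) c).2 i j = true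
    case neg =>
      exact hmD _ _ (hmC _ _ (ih _ (r-1) c hdA (by omega) i j s2 (by simpa using s1) q hadj))
    by_cases s0 : visV (markV v r.toNat c.toNat) i j = true
    case neg =>
      exact hmD _ _ (hmC _ _ (hmB _ _ (ih _ (r+1) c hd1 (by omega) i j s1 (by simpa using s0) q hadj)))
    rw [visV_mark g v hd hb1 hb2, hold] at s0
    simp only [Bool.false_or, Bool.and_eq_true, decide_eq_true_eq] at s0
    rcases s0 with ⟨hri, hcj⟩
    subst hri
    subst hcj
    rcases hadj with ⟨hop, hoq, geo⟩
    rcases geo with ⟨hfst, hsnd⟩ | ⟨hsnd, hfst⟩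
    · rcases hsnd with hup | hdn
      · -- q = (r.toNat, c.toNat + 1): third subcall (c+1)
        have he2 : (((r:Int).toNat : Nat), ((c+1:Int)).toNat) = q := by
          have hh1 := hfst
          have hh2 := hup
          refine Prod.ext ?_ ?_ <;> dsimp only at hh1 hh2 ⊢ <;> omega
        subst he2
        exact hmD _ _ (dfsA_marks g fuel (dfsA g fuel (dfsA g fuel (markV v r.toNat c.toNat) (r+1) c).2 (r-1) c).2 r (c+1) hdB hfuel1 (by omega) (by omega) hoq)
      · -- q = (r.toNat, c.toNat - 1): fourth subcall (c-1)
        have he2 : (((r:Int).toNat : Nat), ((c-1:Int)).toNat) = q := by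
          have hh1 := hfst
          have hh2 := hdn
          refine Prod.ext ?_ ?_ <;> dsimp only at hh1 hh2 ⊢ <;> omega
        subst he2
        exact dfsA_marks g fuel (dfsA g fuel (dfsA g fuel (dfsA g fuel (markV v r.toNat c.toNat) (r+1) c).2 (r-1) c).2 r (c+1)).2 r (c-1) hdC hfuel1 (by omega) (by omega) hoq
    · rcases hfst with hup | hdn
      · -- q = (r.toNat + 1, c.toNat): first subcall (r+1)
        have he2 : ((((r+1):Int).toNat : Nat), ((c:Int)).toNat) = q := by
          have hh1 := hsnd
          have hh2 := hup
          refine Prod.ext ?_ ?_ <;> dsimp only at hh1 hh2 ⊢ <;> omega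
        subst he2
        exact hmD _ _ (hmC _ _ (hmB _ _ (dfsA_marks g fuel (markV v r.toNat c.toNat) (r+1) c hd1 hfuel1 (by omega) (by omega) hoq)))
      · -- q = (r.toNat - 1, c.toNat): second subcall (r-1)
        have he2 : ((((r-1):Int).toNat : Nat), ((c:Int)).toNat) = q := by
          have hh1 := hsnd
          have hh2 := hdn
          refine Prod.ext ?_ ?_ <;> dsimp only at hh1 hh2 ⊢ <;> omega
        subst he2
        exact hmD _ _ (hmC _ _ (dfsA_marks g fuel (dfsA g fuel (markV v r.toNat c.toNat) (r+1) c).2 (r-1) c hdA hfuel1 (by omega) (by omega) hoq))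

lemma adjP_symm (g : List (List Char)) : Symmetric (adjP g) := by
  rintro p q ⟨hp, hq, hgeo⟩
  refine ⟨hq, hp, ?_⟩
  tauto

lemma compS_iff_reach (g : List (List Char)) (p : Nat × Nat) (hp : openP g p) (q : Nat × Nat) :
    compS g p q ↔ reachP g p q := by
  constructor
  · intro h
    obtain ⟨hr0, hc0, hox, hre⟩ := dfsA_reach_new g (FUELg g) (freshV g) (p.1 : Int) (p.2 : Int)
      (dims_fresh g) q.1 q.2 h (visV_fresh g q.1 q.2)
    have he : ((((p.1 : Int)).toNat : Nat), ((p.2 : Int)).toNat) = p := by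
      refine Prod.ext ?_ ?_ <;> simp
    rw [he] at hre
    exact hre
  · intro h
    unfold reachP at h
    induction h with
    | refl =>
      have := dfsA_marks g (FUELg g) (freshV g) (p.1 : Int) (p.2 : Int) (dims_fresh g)
        (by unfold FUELg; omega) (by omega) (by omega)
        (by simpa using hp)
      unfold compS outA
      simpa using this
    | @tail b q hpb hadj ih =>
      have hflt : falseC g (freshV g) < FUELg g := by
        rw [falseC_fresh]
        unfold FUELg
        omega
      have hvb := ih
      unfold compS at hvb ⊢
      exact dfsA_closed g (FUELg g) (freshV g) (p.1 : Int) (p.2 : Int) (dims_fresh g) hflt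
        b.1 b.2 (by simpa using hvb) (visV_fresh g b.1 b.2) q (by simpa using hadj)

lemma compS_congr (g : List (List Char)) (p q : Nat × Nat) (hp : openP g p) (hq : compS g p q) :
    openP g q ∧ ∀ z, (compS g q z ↔ compS g p z) := by
  have hq' : openP g q := by
    have := dfsA_open_new g (FUELg g) (freshV g) (p.1 : Int) (p.2 : Int) (dims_fresh g)
      q.1 q.2 hq (visV_fresh g q.1 q.2)
    simpa using this
  have hsymm : Symmetric (reachP g) := Relation.ReflTransGen.symmetric (adjP_symm g)
  have hpq : reachP g p q := (compS_iff_reach g p hp q).1 hq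
  refine ⟨hq', fun z => ?_⟩
  rw [compS_iff_reach g p hp z, compS_iff_reach g q hq' z]
  constructor
  · intro h
    exact Relation.ReflTransGen.trans hpq h
  · intro h
    exact Relation.ReflTransGen.trans (hsymm hpq) h

lemma nVal_eq_card (g : List (List Char)) (p : Nat × Nat) :
    nVal g p = (((cellsF g).filter (fun q => visV (outA g p).2 q.1 q.2 = true ∧
      gridAt g q.1 q.2 = 'D')).card : Int) := by
  unfold nVal outA
  rw [dfsA_count g (FUELg g) (freshV g) (p.1 : Int) (p.2 : Int) (dims_fresh g)]
  exact congrArg _ (congrArg _ (Finset.filter_congr (fun z _ => by simp [visV_fresh])))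

lemma nVal_inv (g : List (List Char)) (p q : Nat × Nat) (hp : openP g p) (hq : compS g p q) :
    nVal g q = nVal g p := by
  obtain ⟨hq', hiff⟩ := compS_congr g p q hp hq
  rw [nVal_eq_card, nVal_eq_card]
  exact congrArg _ (congrArg _ (Finset.filter_congr (fun z _ =>
    and_congr_left (fun _ => hiff z))))

lemma nVal_pos_D (g : List (List Char)) (p : Nat × Nat) (h : 1 ≤ nVal g p) :
    ∃ q, q.1 < g.length ∧ q.2 < colsG g ∧ compS g p q ∧ gridAt g q.1 q.2 = 'D' := by
  rw [nVal_eq_card] at h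
  have hcard : 0 < ((cellsF g).filter (fun q => visV (outA g p).2 q.1 q.2 = true ∧
      gridAt g q.1 q.2 = 'D')).card := by omega
  obtain ⟨q, hq⟩ := Finset.card_pos.1 hcard
  rw [Finset.mem_filter] at hq
  rcases hq with ⟨hmem, hvis, hD⟩
  simp only [cellsF, Finset.mem_product, Finset.mem_range] at hmem
  exact ⟨q, hmem.1, hmem.2, hvis, hD⟩

lemma contains_add (s : List (Int × Int)) (x y : Int × Int) :
    PySem.Set.contains (PySem.Set.add s x) y = (PySem.Set.contains s y || decide (y = x)) := by
  unfold PySem.Set.add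
  split_ifs with h
  · by_cases hxy : y = x
    · subst hxy
      simp_all [PySem.Set.contains, List.contains_eq_mem]
    · simp [hxy]
  · unfold PySem.Set.contains at *
    simp only [List.contains_eq_mem, List.mem_append, List.mem_singleton]
    by_cases hxy : y = x <;> simp [hxy]

lemma simAB (g : List (List Char)) (w : Nat × Nat → Bool)
    (hwO : ∀ p, w p = true → openP g p)
    (hwC : ∀ p q, w p = true → adjP g p q → w q = true) :
    ∀ (fuel : Nat) (v : List (List Bool)) (s : List (Int × Int)) (r c : Int),
    dimsV g v →
    (∀ x ∈ s, ∃ i j : Nat, x = ((i : Int), (j : Int)) ∧ openP g (i, j)) →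
    (∀ (i j : Nat), i < g.length → j < colsG g →
      PySem.Set.contains s ((i : Int), (j : Int)) = (visV v i j || w (i, j))) →
    (∀ (i j : Nat), r = (i : Int) → c = (j : Int) → openP g (i, j) → w (i, j) = false) →
    (floodB g (g.length : Int) ((colsG g : Nat) : Int) fuel s r c).1 = (dfsA g fuel v r c).1 ∧
    (∀ x ∈ (floodB g (g.length : Int) ((colsG g : Nat) : Int) fuel s r c).2,
      ∃ i j : Nat, x = ((i : Int), (j : Int)) ∧ openP g (i, j)) ∧
    dimsV g (dfsA g fuel v r c).2 ∧
    (∀ (i j : Nat), i < g.length → j < colsG g →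
      PySem.Set.contains (floodB g (g.length : Int) ((colsG g : Nat) : Int) fuel s r c).2 ((i : Int), (j : Int)) =
        (visV (dfsA g fuel v r c).2 i j || w (i, j))) := by
  intro fuel
  induction fuel with
  | zero =>
    intro v s r c hd hmem hcont hwx
    rw [floodB_zero, dfsA_zero]
    exact ⟨rfl, hmem, hd, hcont⟩
  | succ fuel ih =>
    intro v s r c hd hmem hcont hwx
    rw [floodB_succ, dfsA_succ]
    by_cases h1 : (r < 0 ∨ ((g.length : Nat) : Int) ≤ r)
    · have hB : (r < 0 ∨ ((g.length : Nat) : Int) ≤ r ∨ c < 0 ∨ ((colsG g : Nat) : Int) ≤ c) := by tauto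
      rw [if_pos hB, if_pos h1]
      exact ⟨rfl, hmem, hd, hcont⟩
    by_cases h2 : (c < 0 ∨ ((colsG g : Nat) : Int) ≤ c)
    · have hB : (r < 0 ∨ ((g.length : Nat) : Int) ≤ r ∨ c < 0 ∨ ((colsG g : Nat) : Int) ≤ c) := by tauto
      rw [if_pos hB, if_neg h1, if_pos h2]
      exact ⟨rfl, hmem, hd, hcont⟩
    have hBn : ¬(r < 0 ∨ ((g.length : Nat) : Int) ≤ r ∨ c < 0 ∨ ((colsG g : Nat) : Int) ≤ c) := by tauto
    rw [if_neg hBn, if_neg h1, if_neg h2]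
    have hb1 : r.toNat < g.length := by omega
    have hb2 : c.toNat < colsG g := by omega
    have hrc : (r, c) = (((r.toNat : Nat) : Int), ((c.toNat : Nat) : Int)) := by
      refine Prod.ext ?_ ?_ <;> dsimp only <;> omega
    by_cases h3 : gridAt g r.toNat c.toNat = '#'
    · have hB : (gridAt g r.toNat c.toNat = '#' ∨ PySem.Set.contains s (r, c) = true) := Or.inl h3
      have hA : (gridAt g r.toNat c.toNat = '#' ∨ visV v r.toNat c.toNat = true) := Or.inl h3
      rw [if_pos hB, if_pos hA]
      exact ⟨rfl, hmem, hd, hcont⟩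
    have hox : openP g (r.toNat, c.toNat) := ⟨hb1, hb2, h3⟩
    have hwx0 : w (r.toNat, c.toNat) = false := hwx r.toNat c.toNat (by omega) (by omega) hox
    have hcx : PySem.Set.contains s (r, c) = visV v r.toNat c.toNat := by
      rw [hrc, hcont r.toNat c.toNat hb1 hb2, hwx0, Bool.or_false]
    by_cases h4 : visV v r.toNat c.toNat = true
    · have hB : (gridAt g r.toNat c.toNat = '#' ∨ PySem.Set.contains s (r, c) = true) := Or.inr (by rw [hcx]; exact h4)
      have hA : (gridAt g r.toNat c.toNat = '#' ∨ visV v r.toNat c.toNat = true) := Or.inr h4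
      rw [if_pos hB, if_pos hA]
      exact ⟨rfl, hmem, hd, hcont⟩
    have h4' : visV v r.toNat c.toNat = false := by simpa using h4
    have hBn2 : ¬(gridAt g r.toNat c.toNat = '#' ∨ PySem.Set.contains s (r, c) = true) := by
      intro hcon
      rcases hcon with hcon | hcon
      · exact h3 hcon
      · rw [hcx] at hcon
        exact h4 hcon
    have hAn2 : ¬(gridAt g r.toNat c.toNat = '#' ∨ visV v r.toNat c.toNat = true) := by
      simp [h3, h4']
    rw [if_neg hBn2, if_neg hAn2]
    have hd1 := dims_mark g v hd r.toNat c.toNat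
    have hmem1 : ∀ x ∈ PySem.Set.add s (r, c), ∃ i j : Nat, x = ((i : Int), (j : Int)) ∧ openP g (i, j) := by
      intro x hx
      rcases (PySem.Set.mem_add s (r, c) x).1 hx with hx | hx
      · exact hmem x hx
      · exact ⟨r.toNat, c.toNat, by rw [hx, hrc], hox⟩
    have hcont1 : ∀ (i j : Nat), i < g.length → j < colsG g →
        PySem.Set.contains (PySem.Set.add s (r, c)) ((i : Int), (j : Int)) =
          (visV (markV v r.toNat c.toNat) i j || w (i, j)) := by
      intro i j hi hj
      rw [contains_add, hcont i j hi hj, visV_mark g v hd hb1 hb2]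
      have hiff : (((i : Int), (j : Int)) = ((r : Int), (c : Int))) ↔ (r.toNat = i ∧ c.toNat = j) := by
        rw [Prod.ext_iff]
        dsimp only
        omega
      by_cases hqi : r.toNat = i <;> by_cases hqj : c.toNat = j <;>
        cases hv1 : visV v i j <;> cases hw1 : w (i, j) <;>
          simp [hiff, hqi, hqj]
    have hw1 : ∀ (i j : Nat), r + 1 = (i : Int) → c = (j : Int) → openP g (i, j) → w (i, j) = false := by
      intro i j hri hcj hop
      by_contra hwt
      have hwt' : w (i, j) = true := by simpa using hwt
      have hadj : adjP g (i, j) (r.toNat, c.toNat) :=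
        ⟨hop, hox, Or.inr ⟨by dsimp only; omega, Or.inr (by dsimp only; omega)⟩⟩
      exact absurd (hwC _ _ hwt' hadj) (by simp [hwx0])
    have hw2 : ∀ (i j : Nat), r - 1 = (i : Int) → c = (j : Int) → openP g (i, j) → w (i, j) = false := by
      intro i j hri hcj hop
      by_contra hwt
      have hwt' : w (i, j) = true := by simpa using hwt
      have hadj : adjP g (i, j) (r.toNat, c.toNat) :=
        ⟨hop, hox, Or.inr ⟨by dsimp only; omega, Or.inl (by dsimp only; omega)⟩⟩
      exact absurd (hwC _ _ hwt' hadj) (by simp [hwx0])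
    have hw3 : ∀ (i j : Nat), r = (i : Int) → c + 1 = (j : Int) → openP g (i, j) → w (i, j) = false := by
      intro i j hri hcj hop
      by_contra hwt
      have hwt' : w (i, j) = true := by simpa using hwt
      have hadj : adjP g (i, j) (r.toNat, c.toNat) :=
        ⟨hop, hox, Or.inl ⟨by dsimp only; omega, Or.inr (by dsimp only; omega)⟩⟩
      exact absurd (hwC _ _ hwt' hadj) (by simp [hwx0])
    have hw4 : ∀ (i j : Nat), r = (i : Int) → c - 1 = (j : Int) → openP g (i, j) → w (i, j) = false := by
      intro i j hri hcj hop
      by_contra hwt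
      have hwt' : w (i, j) = true := by simpa using hwt
      have hadj : adjP g (i, j) (r.toNat, c.toNat) :=
        ⟨hop, hox, Or.inl ⟨by dsimp only; omega, Or.inl (by dsimp only; omega)⟩⟩
      exact absurd (hwC _ _ hwt' hadj) (by simp [hwx0])
    obtain ⟨q1eq, mem1, dimsA, rel1⟩ := ih (markV v r.toNat c.toNat) (PySem.Set.add s (r, c)) (r+1) c hd1 hmem1 hcont1 hw1
    obtain ⟨q2eq, mem2, dimsB, rel2⟩ := ih _ _ (r-1) c dimsA mem1 rel1 hw2
    obtain ⟨q3eq, mem3, dimsC, rel3⟩ := ih _ _ r (c+1) dimsB mem2 rel2 hw3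
    obtain ⟨q4eq, mem4, dimsD, rel4⟩ := ih _ _ r (c-1) dimsC mem3 rel3 hw4
    refine ⟨?_, ?_, ?_, ?_⟩
    · dsimp only
      rw [q1eq, q2eq, q3eq, q4eq]
    · exact mem4
    · exact dimsD
    · exact rel4

-- nested range folds flatten to a fold over the pair list
lemma foldl_nested {α : Type} (m n : Nat) (f : α → Nat → Nat → α) (init : α) :
    (List.range m).foldl (fun a r => (List.range n).foldl (fun a c => f a r c) a) init
      = ((List.range m).flatMap (fun r => (List.range n).map (fun c => (r, c)))).foldl
          (fun a p => f a p.1 p.2) init := by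
  induction m generalizing init with
  | zero => rfl
  | succ m ih =>
    rw [List.range_succ, List.foldl_append, List.flatMap_append, List.foldl_append, ih]
    simp [List.foldl_map]

lemma buildV (n : Nat) (x : List Bool) :
    (List.range n).foldl (fun v _ => v ++ [x]) [] = List.replicate n x := by
  induction n with
  | zero => rfl
  | succ n ih =>
    rw [List.range_succ, List.foldl_append, ih, List.replicate_succ']
    rfl

lemma mem_pairsL (g : List (List Char)) (p : Nat × Nat) :
    p ∈ pairsL g ↔ p.1 < g.length ∧ p.2 < colsG g := by
  unfold pairsL
  rcases p with ⟨a, b⟩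
  simp only [List.mem_flatMap, List.mem_map, List.mem_range]
  constructor
  · rintro ⟨r, hr, c, hc, h⟩
    cases h
    exact ⟨hr, hc⟩
  · rintro ⟨h1, h2⟩
    exact ⟨a, h1, b, h2, rfl⟩

def stepA (g : List (List Char)) (count : Int) (p : Nat × Nat) : Int :=
  if gridAt g p.1 p.2 = 'D' then
    max count (dfsA g (g.length * (g.getD 0 []).length + 1)
      ((List.range g.length).foldl (fun v _ => v ++ [List.replicate (g.getD 0 []).length false]) [])
      (p.1 : Int) (p.2 : Int)).1
  else count

lemma stepA_eq (g : List (List Char)) (count : Int) (p : Nat × Nat) :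
    stepA g count p = if gridAt g p.1 p.2 = 'D' then max count (nVal g p) else count := by
  unfold stepA nVal outA FUELg freshV colsG
  rw [buildV]

lemma contains_iff_mem (s : List (Int × Int)) (x : Int × Int) :
    PySem.Set.contains s x = true ↔ x ∈ s := by
  simp [PySem.Set.contains, List.contains_eq_mem]

def stepB (g : List (List Char)) (st : Int × List (Int × Int)) (p : Nat × Nat) : Int × List (Int × Int) :=
  if gridAt g p.1 p.2 = 'D' ∧ ¬ PySem.Set.contains st.2 ((p.1 : Int), (p.2 : Int)) then
    let q := floodB g (g.length : Int) ((colsG g : Nat) : Int) (FUELg g) st.2 (p.1 : Int) (p.2 : Int)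
    (max st.1 q.1, q.2)
  else st

lemma A_eq_fold (graph : List String) :
    max_diamonds graph = (pairsL (graph.map String.toList)).foldl (stepA (graph.map String.toList)) 0 := by
  have h := foldl_nested (α := Int) (graph.map String.toList).length
    ((graph.map String.toList).getD 0 []).length
    (fun count r c => if gridAt (graph.map String.toList) r c = 'D' then
      max count (dfsA (graph.map String.toList)
        ((graph.map String.toList).length * ((graph.map String.toList).getD 0 []).length + 1)
        ((List.range (graph.map String.toList).length).foldl
          (fun v _ => v ++ [List.replicate ((graph.map String.toList).getD 0 []).length false]) [])
        (r : Int) (c : Int)).1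
     else count) 0
  exact h

lemma B_eq_fold (graph : List String) :
    max_diamonds_alt graph =
      ((pairsL (graph.map String.toList)).foldl (stepB (graph.map String.toList)) (0, [])).1 := by
  have h := foldl_nested (α := Int × List (Int × Int)) (graph.map String.toList).length
    ((graph.map String.toList).getD 0 []).length
    (fun st r c => if gridAt (graph.map String.toList) r c = 'D' ∧
        ¬ PySem.Set.contains st.2 ((r : Int), (c : Int)) then
      let p := floodB (graph.map String.toList) ((graph.map String.toList).length : Int)
        (((graph.map String.toList).getD 0 []).length : Int)
        ((graph.map String.toList).length * ((graph.map String.toList).getD 0 []).length + 1)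
        st.2 (r : Int) (c : Int)
      (max st.1 p.1, p.2)
     else st) ((0 : Int), ([] : List (Int × Int)))
  exact congrArg Prod.fst h

lemma foldA_ge_init (g : List (List Char)) : ∀ (l : List (Nat × Nat)) (init : Int),
    init ≤ l.foldl (stepA g) init := by
  intro l
  induction l with
  | nil => simp
  | cons p l ih =>
    intro init
    refine le_trans ?_ (ih (stepA g init p))
    rw [stepA_eq]
    split_ifs
    · exact le_max_left _ _
    · exact le_refl _

lemma foldA_ge_elem (g : List (List Char)) : ∀ (l : List (Nat × Nat)) (init : Int) (p : Nat × Nat),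
    p ∈ l → gridAt g p.1 p.2 = 'D' → nVal g p ≤ l.foldl (stepA g) init := by
  intro l
  induction l with
  | nil => simp
  | cons q l ih =>
    intro init p hp hD
    rcases List.mem_cons.1 hp with h | h
    · subst h
      refine le_trans ?_ (foldA_ge_init g l (stepA g init p))
      rw [stepA_eq, if_pos hD]
      exact le_max_right _ _
    · exact ih (stepA g init q) p h hD

lemma foldA_le (g : List (List Char)) : ∀ (l : List (Nat × Nat)) (init K : Int),
    init ≤ K → (∀ p ∈ l, gridAt g p.1 p.2 = 'D' → nVal g p ≤ K) →
    l.foldl (stepA g) init ≤ K := by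
  intro l
  induction l with
  | nil => intro init K h _; simpa using h
  | cons q l ih =>
    intro init K h hall
    refine ih _ K ?_ (fun p hp hD => hall p (List.mem_cons_of_mem _ hp) hD)
    rw [stepA_eq]
    split_ifs with hq
    · exact max_le h (hall q (List.mem_cons_self) hq)
    · exact h

def InvB (g : List (List Char)) (processed : List (Nat × Nat)) (best : Int) (s : List (Int × Int)) : Prop :=
  (∀ x ∈ s, ∃ i j : Nat, x = ((i : Int), (j : Int)) ∧ openP g (i, j)) ∧
  (∀ (i j : Nat), i < g.length → j < colsG g →
    (PySem.Set.contains s ((i : Int), (j : Int)) = true ↔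
      ∃ z ∈ processed, openP g z ∧ gridAt g z.1 z.2 = 'D' ∧ compS g z (i, j))) ∧
  0 ≤ best ∧
  (∀ z ∈ processed, openP g z → gridAt g z.1 z.2 = 'D' → nVal g z ≤ best) ∧
  (best = 0 ∨ ∃ z, openP g z ∧ best = nVal g z)

lemma B_inv (g : List (List Char)) : ∀ (l processed : List (Nat × Nat)) (best : Int) (s : List (Int × Int)),
    InvB g processed best s → (∀ p ∈ l, p.1 < g.length ∧ p.2 < colsG g) →
    InvB g (processed ++ l) (l.foldl (stepB g) (best, s)).1 (l.foldl (stepB g) (best, s)).2 := by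
  intro l
  induction l with
  | nil =>
    intro processed best s h _
    simpa using h
  | cons p l ih =>
    intro processed best s hInv hlb
    obtain ⟨hp1, hp2⟩ := hlb p List.mem_cons_self
    have hrest : ∀ q ∈ l, q.1 < g.length ∧ q.2 < colsG g :=
      fun q hq => hlb q (List.mem_cons_of_mem _ hq)
    rw [List.foldl_cons]
    have hflt : falseC g (freshV g) < FUELg g := by
      rw [falseC_fresh]
      unfold FUELg
      omega
    obtain ⟨ha, hdchar, hb0, hub, hwit⟩ := hInv
    have hnext : InvB g (processed ++ [p]) (stepB g (best, s) p).1 (stepB g (best, s) p).2 := by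
      unfold stepB
      by_cases hguard : gridAt g p.1 p.2 = 'D' ∧ ¬ PySem.Set.contains (best, s).2 ((p.1 : Int), (p.2 : Int))
      · rw [if_pos hguard]
        dsimp only
        have hopenp : openP g p := ⟨hp1, hp2, by rw [hguard.1]; decide⟩
        -- instantiate the simulation with w = membership in s
        have hwO : ∀ z, (fun z : Nat × Nat => PySem.Set.contains s ((z.1 : Int), (z.2 : Int))) z = true → openP g z := by
          intro z hz
          obtain ⟨i, j, heq, hop⟩ := ha _ ((contains_iff_mem s _).1 hz)
          have hzz : z = (i, j) := by
            rw [Prod.ext_iff] at heq ⊢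
            dsimp only at heq ⊢
            omega
          rw [hzz]
          exact hop
        have hwC : ∀ z q, (fun z : Nat × Nat => PySem.Set.contains s ((z.1 : Int), (z.2 : Int))) z = true →
            adjP g z q → (fun z : Nat × Nat => PySem.Set.contains s ((z.1 : Int), (z.2 : Int))) q = true := by
          intro z q hz hadj
          have hzo := hwO z hz
          obtain ⟨z0, hz0mem, hz0open, hz0D, hz0S⟩ := (hdchar z.1 z.2 hzo.1 hzo.2.1).1 hz
          have hqS : visV (outA g z0).2 q.1 q.2 = true :=
            dfsA_closed g (FUELg g) (freshV g) (z0.1 : Int) (z0.2 : Int) (dims_fresh g) hflt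
              z.1 z.2 hz0S (visV_fresh g z.1 z.2) q hadj
          have hqo : openP g q := hadj.2.1
          exact (hdchar q.1 q.2 hqo.1 hqo.2.1).2 ⟨z0, hz0mem, hz0open, hz0D, hqS⟩
        obtain ⟨hq1, hmem', hdims', hrel'⟩ := simAB g
          (fun z : Nat × Nat => PySem.Set.contains s ((z.1 : Int), (z.2 : Int))) hwO hwC
          (FUELg g) (freshV g) s (p.1 : Int) (p.2 : Int) (dims_fresh g) ha
          (by
            intro i j hi hj
            simp [visV_fresh])
          (by
            intro i j hri hcj hop
            have hij : (i, j) = p := by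
              rw [Prod.ext_iff]
              dsimp only
              omega
            rw [hij]
            simpa using hguard.2)
        constructor
        · exact hmem'
        refine ⟨?_, ?_, ?_, ?_⟩
        · intro i j hi hj
          rw [hrel' i j hi hj]
          constructor
          · intro hc
            rcases Bool.or_eq_true_iff.1 hc with hc | hc
            · exact ⟨p, List.mem_append_right _ List.mem_cons_self, hopenp, hguard.1, hc⟩
            · obtain ⟨z0, hz0mem, hz0open, hz0D, hz0S⟩ := (hdchar i j hi hj).1 hc
              exact ⟨z0, List.mem_append_left _ hz0mem, hz0open, hz0D, hz0S⟩
          · rintro ⟨z, hzmem, hzopen, hzD, hzS⟩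
            rcases List.mem_append.1 hzmem with hzmem | hzmem
            · have := (hdchar i j hi hj).2 ⟨z, hzmem, hzopen, hzD, hzS⟩
              rw [this]
              simp
            · have hzp : z = p := by simpa using hzmem
              rw [hzp] at hzS
              simp [show visV (dfsA g (FUELg g) (freshV g) (p.1 : Int) (p.2 : Int)).2 i j = true from hzS]
        · exact le_trans hb0 (le_max_left _ _)
        · intro z hzmem hzopen hzD
          rcases List.mem_append.1 hzmem with hzmem | hzmem
          · exact le_trans (hub z hzmem hzopen hzD) (le_max_left _ _)
          · have hzp : z = p := by simpa using hzmem
            rw [hzp]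
            exact le_trans (le_of_eq (show nVal g p = _ from hq1.symm)) (le_max_right _ _)
        · rcases le_total best ((floodB g ((g.length : Nat) : Int) ((colsG g : Nat) : Int) (FUELg g) s (p.1 : Int) (p.2 : Int)).1) with hle | hle
          · refine Or.inr ⟨p, hopenp, ?_⟩
            rw [max_eq_right hle]
            exact hq1
          · rw [max_eq_left hle]
            exact hwit
      · rw [if_neg hguard]
        have hcase : ¬ gridAt g p.1 p.2 = 'D' ∨ PySem.Set.contains s ((p.1 : Int), (p.2 : Int)) = true := by
          by_contra hcon
          push_neg at hcon
          exact hguard ⟨hcon.1, hcon.2⟩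
        refine ⟨ha, ?_, hb0, ?_, hwit⟩
        · intro i j hi hj
          rw [hdchar i j hi hj]
          constructor
          · rintro ⟨z, hzmem, hzopen, hzD, hzS⟩
            exact ⟨z, List.mem_append_left _ hzmem, hzopen, hzD, hzS⟩
          · rintro ⟨z, hzmem, hzopen, hzD, hzS⟩
            rcases List.mem_append.1 hzmem with hzmem | hzmem
            · exact ⟨z, hzmem, hzopen, hzD, hzS⟩
            · have hzp : z = p := by simpa using hzmem
              rw [hzp] at hzS hzopen hzD
              rcases hcase with hcase | hcase
              · exact absurd hzD hcase
              · obtain ⟨z0, hz0mem, hz0open, hz0D, hz0S⟩ := (hdchar p.1 p.2 hp1 hp2).1 hcase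
                obtain ⟨_, hiff⟩ := compS_congr g z0 p hz0open hz0S
                exact ⟨z0, hz0mem, hz0open, hz0D, (hiff (i, j)).1 hzS⟩
        · intro z hzmem hzopen hzD
          rcases List.mem_append.1 hzmem with hzmem | hzmem
          · exact hub z hzmem hzopen hzD
          · have hzp : z = p := by simpa using hzmem
            rcases hcase with hcase | hcase
            · exact absurd (hzp ▸ hzD) hcase
            · obtain ⟨z0, hz0mem, hz0open, hz0D, hz0S⟩ := (hdchar p.1 p.2 hp1 hp2).1 hcase
              rw [hzp, nVal_inv g z0 p hz0open hz0S]
              exact hub z0 hz0mem hz0open hz0D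
    have hres := ih (processed ++ [p]) _ _ hnext hrest
    rw [show processed ++ p :: l = (processed ++ [p]) ++ l from by simp]
    exact hres

-- ===== VERDICT (by name: the statement is the Claim_ definition above) =====
theorem max_diamonds_spec : Claim_equal_max_diamonds := by
  intro graph _ _
  unfold Spec_max_diamonds
  rw [A_eq_fold graph, B_eq_fold graph]
  have hinv0 : InvB (graph.map String.toList) [] 0 [] := by
    refine ⟨by simp, ?_, le_refl 0, by simp, Or.inl rfl⟩
    intro i j hi hj
    simp [PySem.Set.contains]
  have hbounds : ∀ p ∈ pairsL (graph.map String.toList),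
      p.1 < (graph.map String.toList).length ∧ p.2 < colsG (graph.map String.toList) :=
    fun p hp => (mem_pairsL _ p).1 hp
  have hinv := B_inv (graph.map String.toList) (pairsL (graph.map String.toList)) [] 0 [] hinv0 hbounds
  rw [List.nil_append] at hinv
  obtain ⟨ha, hdchar, hb0, hub, hwit⟩ := hinv
  apply le_antisymm
  · apply foldA_le
    · exact hb0
    · intro p hp hD
      have hpp := (mem_pairsL _ p).1 hp
      have hopen : openP (graph.map String.toList) p := ⟨hpp.1, hpp.2, by rw [hD]; decide⟩
      exact hub p hp hopen hD
  · rcases hwit with h0 | ⟨z, hz, hbz⟩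
    · rw [h0]
      exact foldA_ge_init _ _ 0
    · rcases le_or_gt (nVal (graph.map String.toList) z) 0 with hle | hlt
      · rw [hbz]
        exact le_trans hle (foldA_ge_init _ _ 0)
      · obtain ⟨q, hq1, hq2, hqS, hqD⟩ := nVal_pos_D (graph.map String.toList) z (by omega)
        have hval := nVal_inv (graph.map String.toList) z q hz hqS
        rw [hbz, ← hval]
        exact foldA_ge_elem _ (pairsL (graph.map String.toList)) 0 q
          ((mem_pairsL _ q).2 ⟨hq1, hq2⟩) hqD
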